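-- pv_equiv track=rewrite | github.com/samgensburg/adventofcode | 2023/12.py | is_valid_prefix
-- ===== SOURCE A (Python) =====
-- BROKEN = '#'
--
-- WORKING = '.'
--
-- def is_valid_prefix(prefix, numbers):
-- 	counts = get_counts(prefix)
--
-- 	if (l := len(counts)) == 0:
-- 		return True
--
-- 	if l > len(numbers):
-- 		return False
--
-- 	for i in range(l - 1):
-- 		if counts[i] != numbers[i]:
-- 			return False
--
-- 	if counts[l - 1] == numbers[l - 1]:
-- 		return True
--
-- 	return counts[l - 1] < numbers[l - 1] and prefix[-1] == BROKEN
--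
-- def get_counts(springs):
-- 	past = []
-- 	running = 0
-- 	in_run = False
-- 	for spring in springs:
-- 		if spring == WORKING:
-- 			if in_run:
-- 				past.append(running)
-- 				running = 0
-- 				in_run = False
-- 		else:
-- 			assert spring == BROKEN
-- 			if in_run:
-- 				running += 1
-- 			else:
-- 				in_run = True
-- 				running = 1
-- 	if in_run:
-- 		past.append(running)
--
-- 	return past
-- ===== SOURCE B (Python) =====
-- BROKEN = '#'
-- WORKING = '.'
--
-- def is_valid_prefix(prefix, numbers):
--     running = 0
--     in_run = False
--     idx = 0
--     for spring in prefix: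
--         if spring == WORKING:
--             if in_run:
--                 if idx >= len(numbers) or running != numbers[idx]:
--                     return False
--                 idx += 1
--                 running = 0
--                 in_run = False
--         else:
--             assert spring == BROKEN
--             running = running + 1 if in_run else 1
--             in_run = True
--     if in_run:
--         if idx >= len(numbers):
--             return False
--         return running <= numbers[idx]
--     return True
-- ===== Notes on version B (the rewrite author's own statement) =====
-- stated objective: simpler
-- what changed: Fuses get_counts and the validation loop into one single pass that keeps only (running, in_run, idx) instead of materialising the counts list and then index-checking it.
import Mathlib
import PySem

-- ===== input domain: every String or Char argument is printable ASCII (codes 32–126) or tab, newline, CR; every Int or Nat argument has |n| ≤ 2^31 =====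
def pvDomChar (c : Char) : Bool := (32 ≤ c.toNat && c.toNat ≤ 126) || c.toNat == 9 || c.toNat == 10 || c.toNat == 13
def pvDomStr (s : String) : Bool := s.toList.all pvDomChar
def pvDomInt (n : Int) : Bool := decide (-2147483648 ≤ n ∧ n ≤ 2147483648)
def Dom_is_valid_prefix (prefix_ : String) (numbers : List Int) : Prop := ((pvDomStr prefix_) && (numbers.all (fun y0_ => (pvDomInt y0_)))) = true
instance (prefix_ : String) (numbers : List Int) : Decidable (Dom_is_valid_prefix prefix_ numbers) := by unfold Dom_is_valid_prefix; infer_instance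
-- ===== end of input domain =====

-- B fuses get_counts and the validation into one pass keeping only (running, in_run, idx);
-- same return value as A on every string over '.'/'#' (elsewhere both raise AssertionError).

-- ===== PORT A =====
-- one step of get_counts's loop body; state = (past, running, in_run)
def gcStep (st : List Int × Int × Bool) (spring : Char) : List Int × Int × Bool :=
  if spring = '.' then
    if st.2.2 then (st.1 ++ [st.2.1], 0, false) else st
  else
    -- assert spring == BROKEN: Pre_ restricts to '.'/'#', where the assert passes
    if st.2.2 then (st.1, st.2.1 + 1, true) else (st.1, 1, true)

def get_counts (springs : List Char) : List Int :=
  let st := springs.foldl gcStep ([], 0, false)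
  if st.2.2 then st.1 ++ [st.2.1] else st.1

def is_valid_prefix (prefix_ : String) (numbers : List Int) : Bool :=
  let counts := get_counts prefix_.toList
  let l := counts.length
  if l = 0 then true
  else if l > numbers.length then false
  else if ¬ ((List.range (l - 1)).all (fun i => counts.getD i 0 == numbers.getD i 0)) then false
  else if counts.getD (l - 1) 0 == numbers.getD (l - 1) 0 then true
  else decide (counts.getD (l - 1) 0 < numbers.getD (l - 1) 0)
         && (PySem.List.pyGet? prefix_.toList (-1) == some '#')

-- ===== PORT B =====
-- B's single loop, as structural recursion on the characters
def altGo (cs : List Char) (numbers : List Int) (idx : Nat) (running : Int) (in_run : Bool) : Bool :=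
  match cs with
  | [] =>
    if in_run then
      if numbers.length ≤ idx then false else decide (running ≤ numbers.getD idx 0)
    else true
  | c :: rest =>
    if c = '.' then
      if in_run then
        if numbers.length ≤ idx || running != numbers.getD idx 0 then false
        else altGo rest numbers (idx + 1) 0 false
      else altGo rest numbers idx running in_run
    else
      -- assert spring == BROKEN: Pre_ restricts to '.'/'#'
      altGo rest numbers idx (if in_run then running + 1 else 1) true

def is_valid_prefix_alt (prefix_ : String) (numbers : List Int) : Bool :=
  altGo prefix_.toList numbers 0 0 false

-- ===== PRECONDITION & SPEC =====
-- Pre_ excludes strings containing a character other than '.'/'#': on those both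
-- A and B raise AssertionError instead of returning.
def Pre_is_valid_prefix (prefix_ : String) (numbers : List Int) : Prop :=
  (prefix_.toList.all (fun c => c == '.' || c == '#')) = true
instance (prefix_ : String) (numbers : List Int) : Decidable (Pre_is_valid_prefix prefix_ numbers) := by unfold Pre_is_valid_prefix; infer_instance

def pvWitness_is_valid_prefix : String × List Int := ("#.##", [1, 3])

def Spec_is_valid_prefix (prefix_ : String) (numbers : List Int) (out : Bool) : Prop := out = is_valid_prefix_alt prefix_ numbers
instance (prefix_ : String) (numbers : List Int) (out : Bool) : Decidable (Spec_is_valid_prefix prefix_ numbers out) := by unfold Spec_is_valid_prefix; infer_instance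

-- ===== CLAIM (what is proved, stated in full; the proofs are below) =====
def Claim_equal_is_valid_prefix : Prop := ∀ (prefix_ : String) (numbers : List Int), Dom_is_valid_prefix prefix_ numbers → Pre_is_valid_prefix prefix_ numbers → Spec_is_valid_prefix prefix_ numbers (is_valid_prefix prefix_ numbers)

-- ===== LEMMAS AND PROOFS =====

-- run lengths of '#'-runs, recursively, starting from state (running = r, in_run = b)
def runs (cs : List Char) (r : Int) (b : Bool) : List Int :=
  match cs with
  | [] => if b then [r] else []
  | c :: rest =>
    if c = '.' then (if b then [r] else []) ++ runs rest 0 false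
    else runs rest (if b then r + 1 else 1) true

-- whether the scan ends inside a run, starting with in_run = b
def endsRun (cs : List Char) (b : Bool) : Bool :=
  match cs with
  | [] => b
  | c :: rest => endsRun rest (c != '.')

-- recursive characterisation of A's validation of a counts list
def vspec (counts : List Int) (ns : List Int) (lb : Bool) : Bool :=
  match counts, ns with
  | [], _ => true
  | _ :: _, [] => false
  | [c], n :: _ => c == n || (decide (c < n) && lb)
  | c :: c2 :: cs, n :: ns' => c == n && vspec (c2 :: cs) ns' lb

theorem runs_false (cs : List Char) (r r' : Int) : runs cs r false = runs cs r' false := by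
  cases cs with
  | nil => simp [runs]
  | cons c rest => by_cases hc : c = '.' <;> simp [runs, hc]

theorem gc_fold (cs : List Char) : ∀ (past : List Int) (r : Int) (b : Bool),
    (let st := cs.foldl gcStep (past, r, b);
     if st.2.2 then st.1 ++ [st.2.1] else st.1) = past ++ runs cs r b := by
  induction cs with
  | nil => intro past r b; cases b <;> simp [runs]
  | cons c rest ih =>
    intro past r b
    by_cases hc : c = '.'
    · cases b <;> simp [gcStep, hc, runs, ih, runs_false rest r 0]
    · cases b <;> simp [gcStep, hc, runs, ih]

theorem endsRun_runs_ne_nil (cs : List Char) (b : Bool) (r : Int)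
    (h : endsRun cs b = true) : runs cs r b ≠ [] := by
  induction cs generalizing b r with
  | nil => simp [endsRun] at h; simp [runs, h]
  | cons c rest ih =>
    by_cases hc : c = '.'
    · have hb : (c != '.') = false := by simp [hc]
      have h' : endsRun rest false = true := by simpa [endsRun, hb] using h
      simp [runs, hc]
      intro
      exact ih false 0 h'
    · have hb : (c != '.') = true := by simp [hc]
      have h' : endsRun rest true = true := by simpa [endsRun, hb] using h
      simp [runs, hc]
      exact ih true _ h'

theorem vspec_long (counts ns : List Int) (lb : Bool)
    (h : ns.length < counts.length) : vspec counts ns lb = false := by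
  induction counts generalizing ns with
  | nil => simp at h
  | cons c cs ih =>
    cases ns with
    | nil => cases cs <;> simp [vspec]
    | cons n ns' =>
      cases cs with
      | nil => simp at h
      | cons c' cs' =>
        simp [vspec]
        intro
        exact ih ns' (by simpa using h)

-- B's loop computes vspec of the runs of the remaining suffix against the remaining numbers
theorem altGo_eq_vspec (cs : List Char) : ∀ (ns : List Int) (idx : Nat) (r : Int) (b : Bool),
    altGo cs ns idx r b = vspec (runs cs r b) (ns.drop idx) (endsRun cs b) := by
  induction cs with
  | nil =>
    intro ns idx r b
    cases b with
    | false => simp [altGo, runs, endsRun, vspec]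
    | true =>
      simp only [altGo, runs, endsRun]
      by_cases h : ns.length ≤ idx
      · have hnil : ns.drop idx = [] := List.drop_eq_nil_of_le h
        simp [h, hnil, vspec]
      · have h' : idx < ns.length := by omega
        have hd : ns.drop idx = ns[idx]?.getD 0 :: ns.drop (idx + 1) := by
          rw [List.drop_eq_getElem_cons h']; simp [List.getElem?_eq_getElem h']
        simp only [if_neg h, hd]
        by_cases h2 : r = ns[idx]?.getD 0
        · simp [h2, vspec, List.getD]
        · have h3 : (r ≤ ns[idx]?.getD 0) ↔ (r < ns[idx]?.getD 0) := by omega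
          simp [vspec, h2, h3, List.getD]
  | cons c rest ih =>
    intro ns idx r b
    by_cases hc : c = '.'
    · cases b with
      | false => simp [altGo, hc, runs, endsRun, ih, runs_false rest r 0]
      | true =>
        simp only [altGo, if_pos hc, if_pos rfl, runs, endsRun, hc, bne_self_eq_false]
        by_cases h : ns.length ≤ idx
        · have hnil : ns.drop idx = [] := List.drop_eq_nil_of_le h
          simp only [h, decide_true, Bool.true_or, if_true, hnil]
          rcases hr : runs rest 0 false with _ | ⟨x, xs⟩
          · have hend : endsRun rest false = false := by
              by_contra hcon
              exact endsRun_runs_ne_nil rest false 0 (by simpa using hcon) hr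
            simp [hr, hend, vspec]
          · simp [hr, vspec]
        · have h' : idx < ns.length := by omega
          have hd : ns.drop idx = ns[idx]?.getD 0 :: ns.drop (idx + 1) := by
            rw [List.drop_eq_getElem_cons h']; simp [List.getElem?_eq_getElem h']
          rw [hd]
          by_cases hv : r = ns[idx]?.getD 0
          · rcases hr : runs rest 0 false with _ | ⟨x, xs⟩
            · have hend : endsRun rest false = false := by
                by_contra hcon
                exact endsRun_runs_ne_nil rest false 0 (by simpa using hcon) hr
              simp [h, hv, hr, hend, vspec, ih, altGo, List.getD]
            · simp [h, hv, hr, vspec, ih, List.getD]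
          · rcases hr : runs rest 0 false with _ | ⟨x, xs⟩
            · have hend : endsRun rest false = false := by
                by_contra hcon
                exact endsRun_runs_ne_nil rest false 0 (by simpa using hcon) hr
              simp [h, hv, hr, hend, vspec, List.getD]
            · simp [h, hv, hr, vspec, List.getD]
    · have hb : (c != '.') = true := by simp [hc]
      simp [altGo, hc, runs, endsRun, ih, hb]

-- A's index-based validation equals vspec, for a nonempty counts list within bounds
theorem check_eq_vspec (counts : List Int) : ∀ (ns : List Int) (lb : Bool),
    counts ≠ [] → counts.length ≤ ns.length →
    (if ¬ ((List.range (counts.length - 1)).all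
            (fun i => counts.getD i 0 == ns.getD i 0)) then false
     else if counts.getD (counts.length - 1) 0 == ns.getD (counts.length - 1) 0 then true
     else decide (counts.getD (counts.length - 1) 0 < ns.getD (counts.length - 1) 0) && lb)
      = vspec counts ns lb := by
  induction counts with
  | nil => intro ns lb h; simp at h
  | cons c cs ih =>
    intro ns lb _ hlen
    cases ns with
    | nil => simp at hlen
    | cons n ns' =>
      cases cs with
      | nil =>
        by_cases h2 : c = n <;> simp [vspec, h2]
      | cons c' cs' =>
        have hlen' : (c' :: cs').length ≤ ns'.length := by simpa using hlen
        have hr := ih ns' lb (by simp) hlen'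
        have hrange : List.range ((c :: c' :: cs').length - 1)
            = 0 :: (List.range ((c' :: cs').length - 1)).map (· + 1) := by
          simp [List.range_succ_eq_map]
        rw [hrange]
        simp only [List.all_cons, List.all_map, Function.comp]
        by_cases hcn : c = n
        · simp only [List.getD_cons_zero, hcn, beq_self_eq_true, Bool.true_and]
          have hsh : ∀ (k : Nat), (c :: c' :: cs').getD (k + 1) 0 = (c' :: cs').getD k 0 := by
            intro k; simp
          have hsh2 : ∀ (k : Nat), (n :: ns').getD (k + 1) 0 = ns'.getD k 0 := by
            intro k; simp
          simp only [hsh, hsh2, List.length_cons]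
          have : (c :: c' :: cs').length - 1 - 1 = (c' :: cs').length - 1 := by simp
          simp only [vspec, hcn, beq_self_eq_true, Bool.true_and]
          convert hr using 3 <;> simp
        · have h0 : ((c :: c' :: cs').getD 0 0 == (n :: ns').getD 0 0) = false := by
            simp [hcn]
          simp [h0, vspec, hcn]

theorem endsRun_last (cs : List Char) : ∀ (b : Bool),
    (∀ c ∈ cs, c = '.' ∨ c = '#') → cs ≠ [] →
    endsRun cs b = (PySem.List.pyGet? cs (-1) == some '#') := by
  induction cs with
  | nil => intro b _ h; simp at h
  | cons c rest ih =>
    intro b hpre _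
    cases rest with
    | nil =>
      rcases hpre c (by simp) with hc | hc <;>
        simp [endsRun, hc, PySem.List.pyGet?_neg_one, List.getLast?]
    | cons c' rest' =>
      have h1 : endsRun (c :: c' :: rest') b = endsRun (c' :: rest') (c != '.') := rfl
      rw [h1, ih (c != '.') (fun x hx => hpre x (by simp [hx])) (by simp)]
      rw [PySem.List.pyGet?_neg_one, PySem.List.pyGet?_neg_one]
      simp [List.getLast?_cons_cons]

-- ===== VERDICT (by name: the statement is the Claim_ definition above) =====
theorem is_valid_prefix_spec : Claim_equal_is_valid_prefix := by
  intro prefix_ numbers _ hpre0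
  have hpre : ∀ c ∈ prefix_.toList, c = '.' ∨ c = '#' := by
    intro c hc
    have := List.all_eq_true.mp hpre0 c hc
    rcases Bool.or_eq_true_iff.mp this with h | h
    · exact Or.inl (by simpa using h)
    · exact Or.inr (by simpa using h)
  unfold Spec_is_valid_prefix is_valid_prefix is_valid_prefix_alt
  rw [altGo_eq_vspec]
  simp only [List.drop_zero]
  have hgc : get_counts prefix_.toList = runs prefix_.toList 0 false := by
    simpa using gc_fold prefix_.toList [] 0 false
  rw [hgc]
  rcases hr : runs prefix_.toList 0 false with _ | ⟨x, xs⟩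
  · have hend : endsRun prefix_.toList false = false := by
      by_contra hcon
      exact endsRun_runs_ne_nil prefix_.toList false 0 (by simpa using hcon) hr
    simp [hend, vspec]
  · have hne : (x :: xs) ≠ [] := by simp
    have hcs : prefix_.toList ≠ [] := by
      intro h0; rw [h0] at hr; simp [runs] at hr
    by_cases hlen : (x :: xs).length ≤ numbers.length
    · have hl0 : ¬ ((x :: xs).length = 0) := by simp
      simp only [if_neg hl0, if_neg (by omega : ¬ (x :: xs).length > numbers.length)]
      rw [← endsRun_last prefix_.toList false hpre hcs]
      exact check_eq_vspec (x :: xs) numbers (endsRun prefix_.toList false) hne hlen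
    · simp only [if_neg (by simp : ¬ (x :: xs).length = 0),
        if_pos (by omega : (x :: xs).length > numbers.length)]
      exact (vspec_long (x :: xs) numbers _ (by omega)).symm
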